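-- pv_equiv track=rewrite | github.com/antoine-crettenand/odysseus | src/odysseus/services/download_orchestrator.py | _is_reaction_or_review_video
-- ===== SOURCE A (Python) =====
-- def _is_reaction_or_review_video(video_title: str) -> bool:
--     """Check if video title indicates it's a reaction, review, or similar non-album content."""
--     if not video_title:
--         return False
--
--     title_lower = video_title.lower()
--     non_album_keywords = [
--         'reaction',
--         'react',
--         'reacting',
--         'reacts',
--         'first reaction',
--         'first time listening',
--         'first listen',
--         'review',
--         'album review',
--         'music review',
--         'unboxing',
--         'unbox',
--         'reaction to',
--         'reacting to',
--         'reacts to',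
--         'my reaction',
--         'honest reaction',
--         'genuine reaction',
--         'blind reaction',
--         'album reaction',
--         'song reaction',
--         'listening to',
--         'listening session',
--         'first time hearing',
--         'first time hearing',
--         'rate',
--         'rating',
--         'ranking',
--         'rank',
--         'top',
--         'worst',
--         'best',
--         'vs',
--         'versus',
--         'comparison',
--         'breakdown',
--         'analysis',
--         'explained',
--         'meaning',
--         'lyrics explained',
--         'album explained',
--         'discussion',
--         'podcast',
--         'interview',
--         'behind the scenes',
--         'making of',
--         'studio tour',
--         'documentary',
--         'trailer',
--         'teaser',
--         'preview',
--         'snippet',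
--         'clip',
--         'excerpt',
--         'highlights',
--         'best moments',
--         'compilation',
--         'mashup',
--         'remix',
--         'cover',
--         'covers',
--         'tribute',
--         'parody',
--         'meme',
--         'funny',
--         'comedy',
--         'prank',
--         'challenge',
--         'tier list',
--         'ranking',
--         'top 10',
--         'top 5',
--         'worst to best',
--         'best to worst'
--     ]
--
--     # Check for non-album keywords
--     for keyword in non_album_keywords:
--         if keyword in title_lower:
--             return True
--
--     return False
-- ===== SOURCE B (Python) =====
-- # Minimal-antichain keyword set: every keyword of the original 74-entry list
-- # contains one of these 45 as a substring (e.g. 'react' covers 'reaction',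
-- # 'reacts to', ...; 'review' covers 'album review' and even 'preview';
-- # 'rank' covers 'ranking' and 'prank'; 'top' covers 'top 10'), so testing only
-- # these is equivalent.  The scan is position-major: one walk over the lowered
-- # title, testing at each index whether any minimal keyword starts there.
-- # The empty-title guard is unnecessary: no keyword starts anywhere in ''.
-- _MINIMAL_KEYWORDS = (
--     'react', 'first time listening', 'first listen', 'review', 'unbox',
--     'listening to', 'listening session', 'first time hearing', 'rate',
--     'rating', 'rank', 'top', 'worst', 'best', 'vs', 'versus', 'comparison',
--     'breakdown', 'analysis', 'explained', 'meaning', 'discussion', 'podcast',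
--     'interview', 'behind the scenes', 'making of', 'studio tour',
--     'documentary', 'trailer', 'teaser', 'snippet', 'clip', 'excerpt',
--     'highlights', 'compilation', 'mashup', 'remix', 'cover', 'tribute',
--     'parody', 'meme', 'funny', 'comedy', 'challenge', 'tier list',
-- )
--
--
-- def _is_reaction_or_review_video(video_title: str) -> bool:
--     """Check if video title indicates it's a reaction, review, or similar non-album content."""
--     title_lower = video_title.lower()
--     i = 0
--     while i < len(title_lower):
--         if title_lower.startswith(_MINIMAL_KEYWORDS, i):
--             return True
--         i += 1
--     return False
-- ===== Notes on version B (the rewrite author's own statement) =====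
-- stated objective: alternative
-- what changed: Replaced the keyword-major loop over 74 keywords (one full substring search per keyword) by a single position-major scan of the lowered title over a precomputed 45-keyword minimal antichain (every original keyword contains one of them as a substring, so the reduced test is equivalent), and dropped the redundant empty-title guard.
import Mathlib
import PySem

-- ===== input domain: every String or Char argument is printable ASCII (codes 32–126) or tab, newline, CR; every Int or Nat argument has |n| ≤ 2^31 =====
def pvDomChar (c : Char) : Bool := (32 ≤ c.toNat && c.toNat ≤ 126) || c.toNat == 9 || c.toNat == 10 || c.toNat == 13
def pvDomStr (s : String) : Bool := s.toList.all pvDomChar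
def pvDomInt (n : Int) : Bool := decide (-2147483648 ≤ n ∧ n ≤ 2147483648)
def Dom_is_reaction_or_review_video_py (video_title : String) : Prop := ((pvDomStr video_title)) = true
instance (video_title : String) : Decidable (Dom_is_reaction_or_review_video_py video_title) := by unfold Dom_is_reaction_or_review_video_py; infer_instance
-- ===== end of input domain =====

-- B replaces A's 74-keyword substring loop by a position-major scan of the lowered title over a
-- 45-keyword minimal antichain (each original keyword contains one of them), guard dropped.

-- ===== PORT A =====
-- A's literal 74-entry keyword list
def pvNonAlbumKeywords : List String :=
  ["reaction", "react", "reacting", "reacts", "first reaction",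
   "first time listening", "first listen", "review", "album review",
   "music review", "unboxing", "unbox", "reaction to", "reacting to",
   "reacts to", "my reaction", "honest reaction", "genuine reaction",
   "blind reaction", "album reaction", "song reaction", "listening to",
   "listening session", "first time hearing", "first time hearing",
   "rate", "rating", "ranking", "rank", "top", "worst", "best", "vs",
   "versus", "comparison", "breakdown", "analysis", "explained", "meaning",
   "lyrics explained", "album explained", "discussion", "podcast",
   "interview", "behind the scenes", "making of", "studio tour",
   "documentary", "trailer", "teaser", "preview", "snippet", "clip",
   "excerpt", "highlights", "best moments", "compilation", "mashup",
   "remix", "cover", "covers", "tribute", "parody", "meme", "funny",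
   "comedy", "prank", "challenge", "tier list", "ranking", "top 10",
   "top 5", "worst to best", "best to worst"]

-- 'for keyword in …: if keyword in title_lower: return True' is List.any in loop order
def is_reaction_or_review_video_py (video_title : String) : Bool :=
  if video_title.toList = [] then false
  else
    let title_lower := PySem.Chars.lower video_title.toList
    pvNonAlbumKeywords.any (fun keyword => PySem.Chars.isIn keyword.toList title_lower)

-- ===== PORT B =====
-- B's 45-entry minimal keyword tuple
def pvMinimalKeywords : List String :=
  ["react", "first time listening", "first listen", "review", "unbox",
   "listening to", "listening session", "first time hearing", "rate",
   "rating", "rank", "top", "worst", "best", "vs", "versus", "comparison",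
   "breakdown", "analysis", "explained", "meaning", "discussion", "podcast",
   "interview", "behind the scenes", "making of", "studio tour",
   "documentary", "trailer", "teaser", "snippet", "clip", "excerpt",
   "highlights", "compilation", "mashup", "remix", "cover", "tribute",
   "parody", "meme", "funny", "comedy", "challenge", "tier list"]

-- B's 'while i < len(t)' walks the index i; ported as structural recursion on the suffix t.drop i,
-- exact because 'startswith(tuple, i)' for 0 ≤ i < len(t) is 'any startswith' on that suffix.
def pvScan : List Char → Bool
  | [] => false
  | c :: rest =>
      if pvMinimalKeywords.any (fun m => PySem.Chars.startswith (c :: rest) m.toList) then true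
      else pvScan rest

def is_reaction_or_review_video_py_alt (video_title : String) : Bool :=
  pvScan (PySem.Chars.lower video_title.toList)

-- ===== PRECONDITION & SPEC =====
def Spec_is_reaction_or_review_video_py (video_title : String) (out : Bool) : Prop := out = is_reaction_or_review_video_py_alt video_title
instance (video_title : String) (out : Bool) : Decidable (Spec_is_reaction_or_review_video_py video_title out) := by unfold Spec_is_reaction_or_review_video_py; infer_instance

-- ===== CLAIM (what is proved, stated in full; the proofs are below) =====
def Claim_equal_is_reaction_or_review_video_py : Prop := ∀ (video_title : String), Dom_is_reaction_or_review_video_py video_title → Spec_is_reaction_or_review_video_py video_title (is_reaction_or_review_video_py video_title)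

-- ===== LEMMAS AND PROOFS =====

-- every minimal keyword is one of A's keywords
theorem pvMinimal_sub : ∀ m ∈ pvMinimalKeywords, m ∈ pvNonAlbumKeywords := by decide

-- every one of A's keywords contains some minimal keyword as a substring
set_option maxRecDepth 4000 in
theorem pvCovered : ∀ k ∈ pvNonAlbumKeywords, ∃ m ∈ pvMinimalKeywords,
    PySem.Chars.isIn m.toList k.toList = true := by decide

-- no minimal keyword occurs in the empty title
theorem pvMinimal_not_in_nil : ∀ m ∈ pvMinimalKeywords,
    PySem.Chars.isIn m.toList ([] : List Char) = false := by decide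

-- the suffix scan finds exactly the titles containing some minimal keyword
theorem pvScan_iff (t : List Char) :
    pvScan t = true ↔ ∃ m ∈ pvMinimalKeywords, PySem.Chars.isIn m.toList t = true := by
  induction t with
  | nil =>
      simp only [pvScan]
      constructor
      · intro h; exact absurd h (by simp)
      · rintro ⟨m, hm, h⟩; rw [pvMinimal_not_in_nil m hm] at h; exact absurd h (by simp)
  | cons c rest ih =>
      simp only [pvScan]
      split_ifs with h
      · simp only [true_iff]
        obtain ⟨m, hm, hsw⟩ := List.any_eq_true.mp h
        refine ⟨m, hm, ?_⟩
        rw [PySem.Chars.isIn_iff_infix]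
        exact ((PySem.Chars.startswith_iff _ _).mp hsw).isInfix
      · rw [ih]
        constructor
        · rintro ⟨m, hm, hin⟩
          refine ⟨m, hm, ?_⟩
          rw [PySem.Chars.isIn_iff_infix] at hin ⊢
          exact hin.trans (List.suffix_cons c rest).isInfix
        · rintro ⟨m, hm, hin⟩
          refine ⟨m, hm, ?_⟩
          rw [PySem.Chars.isIn_iff_infix] at hin ⊢
          rcases (List.infix_cons_iff).mp hin with hp | hs
          · exfalso
            exact h (List.any_eq_true.mpr ⟨m, hm, (PySem.Chars.startswith_iff _ _).mpr hp⟩)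
          · exact hs

-- A's 74-keyword test equals the minimal 45-keyword test on any title
theorem pvFull_iff_minimal (t : List Char) :
    pvNonAlbumKeywords.any (fun k => PySem.Chars.isIn k.toList t)
      = true ↔ ∃ m ∈ pvMinimalKeywords, PySem.Chars.isIn m.toList t = true := by
  rw [List.any_eq_true]
  constructor
  · rintro ⟨k, hk, hin⟩
    obtain ⟨m, hm, hmk⟩ := pvCovered k hk
    refine ⟨m, hm, ?_⟩
    rw [PySem.Chars.isIn_iff_infix] at hmk hin ⊢
    exact hmk.trans hin
  · rintro ⟨m, hm, hin⟩
    exact ⟨m, pvMinimal_sub m hm, hin⟩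

-- ===== VERDICT (by name: the statement is the Claim_ definition above) =====
theorem is_reaction_or_review_video_py_spec : Claim_equal_is_reaction_or_review_video_py := by
  intro s _
  unfold Spec_is_reaction_or_review_video_py is_reaction_or_review_video_py is_reaction_or_review_video_py_alt
  split_ifs with h
  · rw [h]; decide
  · exact (Bool.eq_iff_iff.mpr ((pvFull_iff_minimal _).trans (pvScan_iff _).symm))
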